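-- pv_equiv track=rewrite | github.com/pawrequest/amherst | src/amherst/models/amherst_models.py | split_addr_str
-- ===== SOURCE A (Python) =====
-- def split_addr_str(address: str) -> dict[str, str]:
--     addr_lines = address.splitlines()
--     town = addr_lines.pop() if len(addr_lines) > 1 else ''
--
--     if len(addr_lines) < 3:
--         addr_lines.extend([''] * (3 - len(addr_lines)))
--     elif len(addr_lines) > 3:
--         addr_lines[2] = ','.join(addr_lines[2:])
--         addr_lines = addr_lines[:3]
--
--     used_lines = [_ for _ in addr_lines if _]
--     return {f'address_line{num}': line for num, line in enumerate(used_lines, start=1)} | {'town': town}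
-- ===== SOURCE B (Python) =====
-- def split_addr_str(address: str) -> dict[str, str]:
--     lines = address.splitlines()
--     total = len(lines)
--     result = {}
--     n = 1
--     tail = None
--     town = ''
--     for i, line in enumerate(lines):
--         if total > 1 and i == total - 1:
--             town = line
--         elif i < 2:
--             if line:
--                 result[f'address_line{n}'] = line
--                 n += 1
--         elif tail is None:
--             tail = line
--         else:
--             tail = tail + ',' + line
--     if tail:
--         result[f'address_line{n}'] = tail
--     result['town'] = town
--     return result
-- ===== Notes on version B (the rewrite author's own statement) =====
-- stated objective: alternative
-- what changed: B replaces A's staged passes (pop the town, pad the body to exactly three lines with empty strings, mutate-and-truncate via join of lines[2:], filter, dict comprehension) by a single explicit loop over enumerate(lines) carrying an accumulator (result dict, next key number, pending comma-joined tail, town) plus one post-loop flush of the tail.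
import Mathlib
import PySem

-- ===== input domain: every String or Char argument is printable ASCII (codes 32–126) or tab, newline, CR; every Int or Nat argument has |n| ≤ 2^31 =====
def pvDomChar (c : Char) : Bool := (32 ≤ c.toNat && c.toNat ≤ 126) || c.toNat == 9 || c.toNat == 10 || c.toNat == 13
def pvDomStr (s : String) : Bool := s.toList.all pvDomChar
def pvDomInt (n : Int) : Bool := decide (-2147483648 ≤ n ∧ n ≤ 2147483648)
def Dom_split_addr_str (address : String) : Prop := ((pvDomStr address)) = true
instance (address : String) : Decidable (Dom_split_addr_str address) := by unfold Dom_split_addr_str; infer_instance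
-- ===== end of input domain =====

-- B replaces A's staged normalization passes (pop the town, pad to exactly three
-- lines, mutate-and-truncate, filter, dict comprehension) by ONE explicit loop over
-- enumerate(lines) carrying an accumulator (result dict, next key number, pending
-- comma-joined tail, town); objective: alternative decomposition, same cost.

-- ===== PORT A =====
-- `town = addr_lines.pop() if len(addr_lines) > 1 else ''` (returns (town, remaining lines))
def pvPopA (addr_lines : List String) : String × List String :=
  if addr_lines.length > 1 then
    match PySem.List.pop? addr_lines (-1) with
    | some (t, rest) => (t, rest)
    | none => ("", addr_lines)   -- unreachable: pop from a list of length > 1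
  else ("", addr_lines)

-- the if/elif cascade: pad with '' to length 3, or join lines[2:] in place and truncate
def pvPadA (addr_lines : List String) : List String :=
  if addr_lines.length < 3 then
    addr_lines ++ List.replicate (3 - addr_lines.length) ""
  else if addr_lines.length > 3 then
    PySem.List.slice
      (addr_lines.set 2 (PySem.Str.join "," (PySem.List.slice addr_lines (some 2) none)))
      none (some 3)
  else addr_lines

-- {f'address_line{num}': line for num, line in enumerate(used_lines, start=1)}
def pvDictA (used_lines : List String) : PySem.Dict String String :=
  (PySem.List.enumerate used_lines 1).foldl
    (fun d p => d.insert (PySem.Str.join "" ["address_line", PySem.Int.toStr p.1]) p.2)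
    PySem.Dict.empty

def split_addr_str (address : String) : List (String × String) :=
  ((pvDictA ((pvPadA (pvPopA (PySem.Str.splitlines address)).2).filter
      (fun s => !s.toList.isEmpty))).update
    [("town", (pvPopA (PySem.Str.splitlines address)).1)]).items

-- ===== PORT B =====
-- the loop body; state = (result, n, tail, town), p = (i, line)
def pvStepB (total : Int) (st : PySem.Dict String String × Int × Option String × String)
    (p : Int × String) : PySem.Dict String String × Int × Option String × String :=
  if total > 1 ∧ p.1 = total - 1 then (st.1, st.2.1, st.2.2.1, p.2)
  else if p.1 < 2 then
    if !p.2.toList.isEmpty then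
      (st.1.insert (PySem.Str.join "" ["address_line", PySem.Int.toStr st.2.1]) p.2,
       st.2.1 + 1, st.2.2.1, st.2.2.2)
    else st
  else
    match st.2.2.1 with
    | none => (st.1, st.2.1, some p.2, st.2.2.2)
    | some t => (st.1, st.2.1, some (PySem.Str.join "" [t, ",", p.2]), st.2.2.2)

-- `for i, line in enumerate(lines): …` run from the initial state
def pvFoldB (lines : List String) : PySem.Dict String String × Int × Option String × String :=
  (PySem.List.enumerate lines 0).foldl (pvStepB (PySem.List.len lines))
    (PySem.Dict.empty, 1, none, "")

-- `if tail: result[f'address_line{n}'] = tail` then `result['town'] = town`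
def pvFinishB (st : PySem.Dict String String × Int × Option String × String) :
    List (String × String) :=
  (match st.2.2.1 with
   | some t =>
     if !t.toList.isEmpty then
       st.1.insert (PySem.Str.join "" ["address_line", PySem.Int.toStr st.2.1]) t
     else st.1
   | none => st.1).insert "town" st.2.2.2 |>.items

def split_addr_str_alt (address : String) : List (String × String) :=
  pvFinishB (pvFoldB (PySem.Str.splitlines address))

-- ===== PRECONDITION & SPEC =====
def Spec_split_addr_str (address : String) (out : List (String × String)) : Prop := out = split_addr_str_alt address
instance (address : String) (out : List (String × String)) : Decidable (Spec_split_addr_str address out) := by unfold Spec_split_addr_str; infer_instance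

-- ===== CLAIM (what is proved, stated in full; the proofs are below) =====
def Claim_equal_split_addr_str : Prop := ∀ (address : String), Dom_split_addr_str address → Spec_split_addr_str address (split_addr_str address)

-- ===== LEMMAS AND PROOFS =====

-- A's `.pop()` on a multi-line list returns the last line and the rest
theorem pvPopA_concat (ys : List String) (t : String) (h : ys ≠ []) :
    pvPopA (ys ++ [t]) = (t, ys) := by
  unfold pvPopA
  rw [if_pos, PySem.List.pop?_last]
  rcases ys with _ | ⟨a, ys⟩
  · exact absurd rfl h
  · simp only [List.length_append, List.length_cons]; omega

-- associativity of the comma-join: prepending `a ++ "," ++` commutes with join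
theorem pvJoinCommaCons (a b : List Char) (rest : List (List Char)) :
    PySem.Chars.join [','] ((a ++ [','] ++ b) :: rest) =
      a ++ [','] ++ PySem.Chars.join [','] (b :: rest) := by
  rcases rest with _ | ⟨r, rest⟩
  · rw [PySem.Chars.join_singleton, PySem.Chars.join_singleton]
  · rw [PySem.Chars.join_cons_cons, PySem.Chars.join_cons_cons]
    simp [List.append_assoc]

-- char-level: the loop's left fold of `acc + ',' + x` is ','.join
theorem pvCatChars (c : List Char) (rest : List (List Char)) :
    rest.foldl (fun acc x => acc ++ [','] ++ x) c = PySem.Chars.join [','] (c :: rest) := by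
  induction rest generalizing c with
  | nil => rw [PySem.Chars.join_singleton]; rfl
  | cons b rest ih =>
    rw [List.foldl_cons, ih, pvJoinCommaCons, ← PySem.Chars.join_cons_cons]

-- string concatenation `t + ',' + x` on the char side
theorem pvCatStr (t x : String) :
    (PySem.Str.join "" [t, ",", x]).toList = t.toList ++ [','] ++ x.toList := by
  simp [PySem.Str.join, PySem.Chars.join_cons_cons, PySem.Chars.join_singleton]

-- string-level: B's accumulated tail IS A's ','.join of the tail lines
theorem pvCat_eq (c : String) (rest : List String) :
    rest.foldl (fun acc x => PySem.Str.join "" [acc, ",", x]) c =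
      PySem.Str.join "," (c :: rest) := by
  apply String.toList_inj.mp
  have h : ∀ (ds : List String) (s : String),
      (ds.foldl (fun acc x => PySem.Str.join "" [acc, ",", x]) s).toList =
        (ds.map String.toList).foldl (fun acc x => acc ++ [','] ++ x) s.toList := by
    intro ds
    induction ds with
    | nil => intro s; rfl
    | cons d ds ih =>
      intro s
      simp only [List.map_cons, List.foldl_cons]
      rw [ih, pvCatStr]
  rw [h, pvCatChars]
  simp [PySem.Str.join]

-- B's loop over the tail lines (indices ≥ 2, before the town line) only accumulates
theorem pvFoldB_tail (total : Int) (xs : List String) (k : Int) (d : PySem.Dict String String)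
    (n : Int) (s : String) (town : String) (h2 : 2 ≤ k) (hlt : k + xs.length ≤ total - 1) :
    (PySem.List.enumerate xs k).foldl (pvStepB total) (d, n, some s, town) =
      (d, n, some (xs.foldl (fun acc x => PySem.Str.join "" [acc, ",", x]) s), town) := by
  induction xs generalizing k s with
  | nil => rfl
  | cons x xs ih =>
    rw [PySem.List.enumerate_cons, List.foldl_cons]
    have hstep : pvStepB total (d, n, some s, town) (k, x) =
        (d, n, some (PySem.Str.join "" [s, ",", x]), town) := by
      unfold pvStepB
      rw [if_neg, if_neg]
      · omega
      · simp only [List.length_cons] at hlt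
        rintro ⟨-, rfl⟩
        omega
    rw [hstep, ih (k + 1) _ (by omega) (by simp only [List.length_cons] at hlt ⊢; omega)]
    rfl

-- A's pad/mutate/truncate cascade, on a body of ≥ 3 lines, yields first-two + joined tail
theorem pvPadA_cons3 (a b c : String) (rest : List String) :
    pvPadA (a :: b :: c :: rest) = [a, b, PySem.Str.join "," (c :: rest)] := by
  unfold pvPadA
  rcases rest with _ | ⟨d, rest⟩
  · rw [if_neg (by simp), if_neg (by simp)]
    have : PySem.Str.join "," [c] = c := by
      apply String.toList_inj.mp
      simp [PySem.Str.join, PySem.Chars.join_singleton]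
    rw [this]
  · rw [if_neg (by simp), if_pos (by simp)]
    rw [PySem.List.slice_from _ (by norm_num : (0:Int) ≤ 2),
      PySem.List.slice_to _ (by norm_num : (0:Int) ≤ 3)]
    rfl

-- the f-string key f'address_line{n}'
def pvKey (n : Int) : String := PySem.Str.join "" ["address_line", PySem.Int.toStr n]

-- B's loop body on an early (i < 2) EMPTY line: state unchanged
theorem pvStepB_skip (total i : Int) (d : PySem.Dict String String) (n : Int)
    (tl : Option String) (town x : String) (hne : ¬(total > 1 ∧ i = total - 1))
    (h2 : i < 2) (hx : x.toList.isEmpty = true) :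
    pvStepB total (d, n, tl, town) (i, x) = (d, n, tl, town) := by
  unfold pvStepB
  rw [if_neg hne, if_pos h2, hx]
  rfl

-- B's loop body on an early (i < 2) nonempty line: insert under the next key
theorem pvStepB_ins (total i : Int) (d : PySem.Dict String String) (n : Int)
    (tl : Option String) (town x : String) (hne : ¬(total > 1 ∧ i = total - 1))
    (h2 : i < 2) (hx : x.toList.isEmpty = false) :
    pvStepB total (d, n, tl, town) (i, x) = (d.insert (pvKey n) x, n + 1, tl, town) := by
  unfold pvStepB pvKey
  rw [if_neg hne, if_pos h2, hx]
  rfl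

-- B's loop body on the first tail line (i ≥ 2, tail still None)
theorem pvStepB_tail0 (total i : Int) (d : PySem.Dict String String) (n : Int)
    (town x : String) (hne : ¬(total > 1 ∧ i = total - 1)) (h2 : ¬ i < 2) :
    pvStepB total (d, n, none, town) (i, x) = (d, n, some x, town) := by
  unfold pvStepB
  rw [if_neg hne, if_neg h2]

-- B's loop body on the town line (the last one, when there is more than one)
theorem pvStepB_town (total i : Int) (d : PySem.Dict String String) (n : Int)
    (tl : Option String) (town x : String) (h : total > 1 ∧ i = total - 1) :
    pvStepB total (d, n, tl, town) (i, x) = (d, n, tl, x) := by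
  unfold pvStepB
  rw [if_pos h]

-- B's loop over first-tail + remaining tail + town line, from any state after index 1
theorem pvBigCont (d : PySem.Dict String String) (n : Int) (c t : String) (ys : List String) :
    List.foldl (pvStepB ((ys.length : Int) + 4)) (d, n, none, "")
      (PySem.List.enumerate (c :: ys) 2 ++ [((2 : Int) + (c :: ys).length, t)]) =
      (d, n, some (PySem.Str.join "," (c :: ys)), t) := by
  have hin : List.foldl (pvStepB ((ys.length : Int) + 4)) (d, n, none, "")
      (PySem.List.enumerate (c :: ys) 2) =
      (d, n, some (PySem.Str.join "," (c :: ys)), "") := by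
    rw [PySem.List.enumerate_cons, List.foldl_cons,
      pvStepB_tail0 _ 2 _ _ _ _ (by rintro ⟨-, h⟩; omega) (by omega),
      pvFoldB_tail _ _ (2 + 1) _ _ _ _ (by omega) (by push_cast; omega),
      pvCat_eq]
  rw [List.foldl_append, hin, List.foldl_cons, List.foldl_nil,
    pvStepB_town _ _ _ _ _ _ _
      ⟨by omega, by simp only [List.length_cons]; push_cast; omega⟩]

-- ===== VERDICT (by name: the statement is the Claim_ definition above) =====
theorem split_addr_str_spec : Claim_equal_split_addr_str := by
  intro address _
  unfold Spec_split_addr_str split_addr_str split_addr_str_alt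
  generalize PySem.Str.splitlines address = ls
  rcases List.eq_nil_or_concat ls with rfl | ⟨ys, t, rfl⟩
  · rfl
  simp only [List.concat_eq_append]
  rcases ys with _ | ⟨a, ys⟩
  · -- one line: it stays in the body, town is ''
    by_cases ha : t.toList.isEmpty <;>
      simp [pvPopA, pvPadA, pvDictA, pvFoldB, pvFinishB, pvStepB,
        PySem.List.enumerate, PySem.Dict.update, ha]
  rcases ys with _ | ⟨b, ys⟩
  · -- two lines: one body line + town
    rw [pvPopA_concat _ _ (by simp)]
    by_cases ha : a.toList.isEmpty <;>
      simp [pvPadA, pvDictA, pvFoldB, pvFinishB, pvStepB,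
        PySem.List.enumerate, PySem.Dict.update, ha]
  rcases ys with _ | ⟨c, ys⟩
  · -- three lines: two body lines + town
    rw [pvPopA_concat _ _ (by simp)]
    by_cases ha : a.toList.isEmpty <;> by_cases hb : b.toList.isEmpty <;>
      simp [pvPadA, pvDictA, pvFoldB, pvFinishB, pvStepB,
        PySem.List.enumerate, PySem.Dict.update, ha, hb]
  · -- ≥ 4 lines: two body lines, a comma-joined tail, and the town
    rw [pvPopA_concat _ _ (by simp), pvPadA_cons3]
    unfold pvFoldB
    have hlen : PySem.List.len (a :: b :: c :: ys ++ [t]) = (ys.length : Int) + 4 := by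
      simp [PySem.List.len_eq]; omega
    have henum : PySem.List.enumerate (a :: b :: c :: ys ++ [t]) 0 =
        (0, a) :: (1, b) :: (PySem.List.enumerate (c :: ys) 2 ++
          [((2 : Int) + (c :: ys).length, t)]) := by
      rw [show a :: b :: c :: ys ++ [t] = a :: b :: ((c :: ys) ++ [t]) by simp,
        PySem.List.enumerate_cons, PySem.List.enumerate_cons, PySem.List.enumerate_append]
      norm_num
    rw [hlen, henum, List.foldl_cons, List.foldl_cons]
    have h0 : ¬((ys.length : Int) + 4 > 1 ∧ (0 : Int) = (ys.length : Int) + 4 - 1) := by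
      rintro ⟨-, h⟩; omega
    have h1 : ¬((ys.length : Int) + 4 > 1 ∧ (1 : Int) = (ys.length : Int) + 4 - 1) := by
      rintro ⟨-, h⟩; omega
    have j1 : PySem.Str.join "" ["address_line", PySem.Int.toStr 1] = "address_line1" := by
      decide
    have j2 : PySem.Str.join "" ["address_line", PySem.Int.toStr 2] = "address_line2" := by
      decide
    have j3 : PySem.Str.join "" ["address_line", PySem.Int.toStr 3] = "address_line3" := by
      decide
    have ks1 : pvKey 1 = "address_line1" := by decide
    have ks2 : pvKey 2 = "address_line2" := by decide
    have ks3 : pvKey 3 = "address_line3" := by decide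
    by_cases ha : a.toList.isEmpty <;> by_cases hb : b.toList.isEmpty
    · rw [pvStepB_skip _ _ _ _ _ _ _ h0 (by omega) ha,
        pvStepB_skip _ _ _ _ _ _ _ h1 (by omega) hb, pvBigCont]
      generalize PySem.Str.join "," (c :: ys) = J
      by_cases hj : J.toList.isEmpty <;>
        simp [pvDictA, pvFinishB, PySem.List.enumerate, PySem.Dict.update,
          PySem.Dict.insert, PySem.Dict.empty, PySem.Dict.contains, ha, hb, hj,
          j1, j2, j3, ks1, ks2, ks3]
    · rw [pvStepB_skip _ _ _ _ _ _ _ h0 (by omega) ha,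
        pvStepB_ins _ _ _ _ _ _ _ h1 (by omega) (by simpa using hb), pvBigCont]
      generalize PySem.Str.join "," (c :: ys) = J
      by_cases hj : J.toList.isEmpty <;>
        simp [pvDictA, pvFinishB, PySem.List.enumerate, PySem.Dict.update,
          PySem.Dict.insert, PySem.Dict.empty, PySem.Dict.contains, ha, hb, hj,
          j1, j2, j3, ks1, ks2, ks3]
    · rw [pvStepB_ins _ _ _ _ _ _ _ h0 (by omega) (by simpa using ha),
        pvStepB_skip _ _ _ _ _ _ _ h1 (by omega) hb, pvBigCont]
      generalize PySem.Str.join "," (c :: ys) = J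
      by_cases hj : J.toList.isEmpty <;>
        simp [pvDictA, pvFinishB, PySem.List.enumerate, PySem.Dict.update,
          PySem.Dict.insert, PySem.Dict.empty, PySem.Dict.contains, ha, hb, hj,
          j1, j2, j3, ks1, ks2, ks3]
    · rw [pvStepB_ins _ _ _ _ _ _ _ h0 (by omega) (by simpa using ha),
        pvStepB_ins _ _ _ _ _ _ _ h1 (by omega) (by simpa using hb), pvBigCont]
      generalize PySem.Str.join "," (c :: ys) = J
      by_cases hj : J.toList.isEmpty <;>
        simp [pvDictA, pvFinishB, PySem.List.enumerate, PySem.Dict.update,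
          PySem.Dict.insert, PySem.Dict.empty, PySem.Dict.contains, ha, hb, hj,
          j1, j2, j3, ks1, ks2, ks3]
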